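-- pv_equiv track=rewrite | github.com/iantextbar/IC_LEMC | casamento/casamento.py | organiza_prop
-- ===== SOURCE A (Python) =====
-- def organiza_prop(lista_propostas):
--
--     prop_p_mulher_1 = []
--     prop_p_mulher_2 = []
--     prop_p_mulher_3 = []
--
--     for prop in range(0, len(lista_propostas)):
--         if lista_propostas[prop][1] == 'm_1':
--             prop_p_mulher_1.append(lista_propostas[prop][0])
--         elif lista_propostas[prop][1] == 'm_2':
--             prop_p_mulher_2.append(lista_propostas[prop][0])
--         else:
--             prop_p_mulher_3.append(lista_propostas[prop][0])
--
--     return prop_p_mulher_1, prop_p_mulher_2, prop_p_mulher_3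
-- ===== SOURCE B (Python) =====
-- def organiza_prop(lista_propostas):
--     prop_p_mulher_1 = [p[0] for p in lista_propostas if p[1] == 'm_1']
--     prop_p_mulher_2 = [p[0] for p in lista_propostas if p[1] == 'm_2']
--     prop_p_mulher_3 = [p[0] for p in lista_propostas if p[1] not in ('m_1', 'm_2')]
--     return prop_p_mulher_1, prop_p_mulher_2, prop_p_mulher_3
-- ===== Notes on version B (the rewrite author's own statement) =====
-- stated objective: simpler
-- what changed: Replaced the index-driven single loop that mutates three accumulator lists via if/elif/else with three independent list comprehensions, one filtering pass per target label.
import Mathlib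
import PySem

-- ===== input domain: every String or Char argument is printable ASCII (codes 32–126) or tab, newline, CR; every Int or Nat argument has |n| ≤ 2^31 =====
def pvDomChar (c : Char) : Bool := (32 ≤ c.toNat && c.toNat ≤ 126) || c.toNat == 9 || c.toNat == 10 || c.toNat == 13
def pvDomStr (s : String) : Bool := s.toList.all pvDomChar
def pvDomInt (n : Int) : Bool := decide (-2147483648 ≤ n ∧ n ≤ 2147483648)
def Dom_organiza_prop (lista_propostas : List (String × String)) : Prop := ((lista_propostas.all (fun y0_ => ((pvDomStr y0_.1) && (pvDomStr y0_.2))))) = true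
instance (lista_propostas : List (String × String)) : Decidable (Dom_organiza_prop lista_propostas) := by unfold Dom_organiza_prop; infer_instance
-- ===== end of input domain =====

-- B replaces A's single index-driven if/elif/else loop with three one-pass list comprehensions, one per target label (objective: simpler).


-- ===== PORT A =====
-- for prop in range(0, len(xs)): if xs[prop][1] == 'm_1' … elif … == 'm_2' … else …
def organiza_prop (lista_propostas : List (String × String)) : List String × List String × List String :=
  let st := (PySem.List.pyRange 0 (PySem.List.len lista_propostas) 1).foldl
    (fun (acc : List String × List String × List String) prop =>
      let p := PySem.List.pyGetD lista_propostas prop ("", "")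
      if p.2 == "m_1" then (acc.1 ++ [p.1], acc.2.1, acc.2.2)
      else if p.2 == "m_2" then (acc.1, acc.2.1 ++ [p.1], acc.2.2)
      else (acc.1, acc.2.1, acc.2.2 ++ [p.1]))
    ([], [], [])
  (st.1, st.2.1, st.2.2)

-- ===== PORT B =====
-- three comprehensions, one filtering pass per label
def organiza_prop_alt (lista_propostas : List (String × String)) : List String × List String × List String :=
  ((lista_propostas.filter (fun p => p.2 == "m_1")).map (·.1),
   (lista_propostas.filter (fun p => p.2 == "m_2")).map (·.1),
   (lista_propostas.filter (fun p => !(p.2 == "m_1" || p.2 == "m_2"))).map (·.1))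

-- ===== PRECONDITION & SPEC =====
def Spec_organiza_prop (lista_propostas : List (String × String)) (out : List String × List String × List String) : Prop := out = organiza_prop_alt lista_propostas
instance (lista_propostas : List (String × String)) (out : List String × List String × List String) : Decidable (Spec_organiza_prop lista_propostas out) := by unfold Spec_organiza_prop; infer_instance

-- ===== CLAIM (what is proved, stated in full; the proofs are below) =====
def Claim_equal_organiza_prop : Prop := ∀ (lista_propostas : List (String × String)), Dom_organiza_prop lista_propostas → Spec_organiza_prop lista_propostas (organiza_prop lista_propostas)

-- ===== LEMMAS AND PROOFS =====

-- A's fold, after replacing indexed access by a fold over the list itself, equals the three filters appended to the accumulators.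
theorem organiza_prop_fold_eq (xs : List (String × String)) (a b c : List String) :
    xs.foldl
      (fun (acc : List String × List String × List String) (p : String × String) =>
        if p.2 == "m_1" then (acc.1 ++ [p.1], acc.2.1, acc.2.2)
        else if p.2 == "m_2" then (acc.1, acc.2.1 ++ [p.1], acc.2.2)
        else (acc.1, acc.2.1, acc.2.2 ++ [p.1]))
      (a, b, c)
    = (a ++ (xs.filter (fun p => p.2 == "m_1")).map (·.1),
       b ++ (xs.filter (fun p => p.2 == "m_2")).map (·.1),
       c ++ (xs.filter (fun p => !(p.2 == "m_1" || p.2 == "m_2"))).map (·.1)) := by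
  induction xs generalizing a b c with
  | nil => simp
  | cons p xs ih =>
    rw [List.foldl_cons]
    by_cases h1 : p.2 = "m_1"
    · rw [if_pos (by simp [h1]), ih]
      simp [List.filter_cons, h1]
    · rw [if_neg (by simp [h1])]
      by_cases h2 : p.2 = "m_2"
      · rw [if_pos (by simp [h2]), ih]
        simp [List.filter_cons, h1, h2]
      · rw [if_neg (by simp [h2]), ih]
        simp [List.filter_cons, h1, h2]

-- ===== VERDICT (by name: the statement is the Claim_ definition above) =====
theorem organiza_prop_spec : Claim_equal_organiza_prop := by
  intro xs _
  show organiza_prop xs = organiza_prop_alt xs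
  unfold organiza_prop organiza_prop_alt
  rw [PySem.List.foldl_pyRange_zero_pyGetD xs ("", "")
    (fun (acc : List String × List String × List String) (p : String × String) =>
        if p.2 == "m_1" then (acc.1 ++ [p.1], acc.2.1, acc.2.2)
        else if p.2 == "m_2" then (acc.1, acc.2.1 ++ [p.1], acc.2.2)
        else (acc.1, acc.2.1, acc.2.2 ++ [p.1])) ([], [], [])]
  rw [organiza_prop_fold_eq]
  simp
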